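-- pv_equiv track=rewrite | github.com/dsi-clinic/idi-ftm2j-terminal | jobs/transform_companies.py | _strip_corporate_suffix
-- ===== SOURCE A (Python) =====
-- def _strip_corporate_suffix(name: str) -> str:
--     """Return the base company name with common legal suffixes removed."""
--     base = name.rstrip(".")
--     for suffix in (" Corp", " Group", " Holdings", " International", " Inc",
--                    " Limited", " Ltd", " SA", " AG", " PLC", " LLC", " LP",
--                    " Co", " NV", " BV", " SE", " SPA", " AB"):
--         if base.upper().endswith(suffix.upper()):
--             return base[: -len(suffix)].rstrip(" ,")
--     return base
-- ===== SOURCE B (Python) =====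
-- _SUFFIX_WORDS = {"CORP", "GROUP", "HOLDINGS", "INTERNATIONAL", "INC",
--                  "LIMITED", "LTD", "SA", "AG", "PLC", "LLC", "LP",
--                  "CO", "NV", "BV", "SE", "SPA", "AB"}
--
--
-- def _strip_corporate_suffix(name: str) -> str:
--     """Return the base company name with common legal suffixes removed."""
--     base = name.rstrip(".")
--     head, sep, tail = base.rpartition(" ")
--     if sep and tail.upper() in _SUFFIX_WORDS:
--         return head.rstrip(" ,")
--     return base
-- ===== Notes on version B (the rewrite author's own statement) =====
-- stated objective: idiomatic
-- what changed: B replaces A's loop of 18 case-insensitive endswith probes by a single rpartition at the last space followed by one set-membership test of the uppercased final token.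
import Mathlib
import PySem

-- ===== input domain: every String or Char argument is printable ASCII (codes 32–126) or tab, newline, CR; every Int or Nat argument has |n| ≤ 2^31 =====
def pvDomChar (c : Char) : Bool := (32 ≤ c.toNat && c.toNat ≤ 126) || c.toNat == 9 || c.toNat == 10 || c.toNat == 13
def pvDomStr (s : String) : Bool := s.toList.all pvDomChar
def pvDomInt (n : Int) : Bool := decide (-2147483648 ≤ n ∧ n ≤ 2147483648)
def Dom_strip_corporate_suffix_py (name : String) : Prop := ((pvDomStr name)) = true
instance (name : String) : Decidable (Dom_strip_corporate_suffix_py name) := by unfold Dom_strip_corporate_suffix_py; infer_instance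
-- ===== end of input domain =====

-- B replaces A's 18 endswith probes by one rpartition at the last space plus one set lookup (alternative decomposition, same cost).

-- shared exact model of Python's s.rstrip(chars): drop trailing characters that are in `chars`
def pvRstripChars (cs chars : List Char) : List Char :=
  (cs.reverse.dropWhile (fun c => chars.contains c)).reverse

-- ===== PORT A =====
def pvSuffixes : List (List Char) :=
  [" Corp".toList, " Group".toList, " Holdings".toList, " International".toList,
   " Inc".toList, " Limited".toList, " Ltd".toList, " SA".toList, " AG".toList,
   " PLC".toList, " LLC".toList, " LP".toList, " Co".toList, " NV".toList,
   " BV".toList, " SE".toList, " SPA".toList, " AB".toList]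

def pvStripLoopA (base : List Char) : List (List Char) → List Char
  | [] => base
  | s :: rest =>
    if PySem.Chars.endswith (PySem.Chars.upper base) (PySem.Chars.upper s) then
      pvRstripChars (PySem.List.slice base none (some (-(s.length : Int)))) [' ', ',']
    else pvStripLoopA base rest

def strip_corporate_suffix_py (name : String) : String :=
  String.ofList (pvStripLoopA (pvRstripChars name.toList ['.']) pvSuffixes)

-- ===== PORT B =====
def pvSuffixWords : List (List Char) :=
  ["CORP".toList, "GROUP".toList, "HOLDINGS".toList, "INTERNATIONAL".toList,
   "INC".toList, "LIMITED".toList, "LTD".toList, "SA".toList, "AG".toList,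
   "PLC".toList, "LLC".toList, "LP".toList, "CO".toList, "NV".toList,
   "BV".toList, "SE".toList, "SPA".toList, "AB".toList]

-- exact model of Python's s.rpartition(" "): split at the LAST space, ("", "", s) when there is none
def pvRpartitionSpace (cs : List Char) : List Char × List Char × List Char :=
  let r := cs.reverse
  let tokR := r.takeWhile (fun c => c != ' ')
  if tokR.length = r.length then ([], [], cs)
  else ((r.drop (tokR.length + 1)).reverse, [' '], tokR.reverse)

def strip_corporate_suffix_py_alt (name : String) : String :=
  let base := pvRstripChars name.toList ['.']
  let p := pvRpartitionSpace base
  if p.2.1 != [] && pvSuffixWords.contains (PySem.Chars.upper p.2.2) then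
    String.ofList (pvRstripChars p.1 [' ', ','])
  else String.ofList base

-- ===== PRECONDITION & SPEC =====
def Spec_strip_corporate_suffix_py (name : String) (out : String) : Prop := out = strip_corporate_suffix_py_alt name
instance (name : String) (out : String) : Decidable (Spec_strip_corporate_suffix_py name out) := by unfold Spec_strip_corporate_suffix_py; infer_instance

-- ===== CLAIM (what is proved, stated in full; the proofs are below) =====
def Claim_equal_strip_corporate_suffix_py : Prop := ∀ (name : String), Dom_strip_corporate_suffix_py name → Spec_strip_corporate_suffix_py name (strip_corporate_suffix_py name)

-- ===== LEMMAS AND PROOFS =====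

-- upperChar never creates or destroys a space
lemma pv_upperChar_space (c : Char) : (PySem.Chars.upperChar c != ' ') = (c != ' ') := by
  unfold PySem.Chars.upperChar PySem.Chars.islower
  by_cases h1 : 'a' ≤ c
  · by_cases h2 : c ≤ 'z'
    · have ha : 97 ≤ c.toNat := h1
      have hb : c.toNat ≤ 122 := h2
      have hv : (c.toNat - 32).isValidChar := Or.inl (by omega)
      have ht : (Char.ofNat (c.toNat - 32)).toNat = c.toNat - 32 := by
        rw [Char.toNat_ofNat, if_pos hv]
      have hx : Char.ofNat (c.toNat - 32) ≠ ' ' := by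
        intro he; have := congrArg Char.toNat he; rw [ht] at this; simp at this; omega
      have hc : c ≠ ' ' := by
        intro he; rw [he] at ha; simp at ha
      have e1 : (Char.ofNat (c.toNat - 32) != ' ') = true := bne_iff_ne.mpr hx
      have e2 : (c != ' ') = true := bne_iff_ne.mpr hc
      simp [h1, h2, e1, e2]
    · simp [h2]
  · simp [h1]

-- a space-free block followed by ' ' is a prefix of l iff it is exactly l's leading space-free block
lemma pv_prefix_token (l a : List Char) (ha : ∀ c ∈ a, (c != ' ') = true) :
    a ++ [' '] <+: l ↔ (l.takeWhile (fun c => c != ' ') = a ∧ (l.takeWhile (fun c => c != ' ')).length ≠ l.length) := by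
  constructor
  · rintro ⟨t, rfl⟩
    have e : a ++ [' '] ++ t = a ++ (' ' :: t) := by simp
    rw [e]
    have hta : (a ++ ' ' :: t).takeWhile (fun c => c != ' ') = a := by
      rw [List.takeWhile_append, if_pos (by rw [List.takeWhile_eq_self_iff.mpr ha])]
      simp
    rw [hta]
    refine ⟨rfl, ?_⟩
    simp
  · rintro ⟨h1, h2⟩
    have hsplit := List.takeWhile_append_dropWhile (p := fun c => c != ' ') (l := l)
    have hne : l.dropWhile (fun c => c != ' ') ≠ [] := by
      intro he
      rw [he, List.append_nil] at hsplit
      exact h2 (by rw [hsplit])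
    have hsp : (l.dropWhile (fun c => c != ' ')).head hne = ' ' := by
      simpa using List.head_dropWhile_not (fun c => c != ' ') hne
    refine ⟨(l.dropWhile (fun c => c != ' ')).tail, ?_⟩
    conv_rhs => rw [← hsplit]
    rw [h1, ← List.cons_head_tail hne, hsp]
    simp

-- the key characterisation: A's endswith test on suffix ' '::w (w space-free)
-- holds iff base contains a space and the uppercased token after the LAST space is exactly upper w
lemma pv_endswith_iff (base w : List Char) (hw : ∀ c ∈ w, (c != ' ') = true) :
    PySem.Chars.endswith (PySem.Chars.upper base) (PySem.Chars.upper (' ' :: w)) =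
      (decide ((base.reverse.takeWhile (fun c => c != ' ')).length ≠ base.reverse.length) &&
       decide (PySem.Chars.upper (base.reverse.takeWhile (fun c => c != ' ')) = (PySem.Chars.upper w).reverse)) := by
  rw [Bool.eq_iff_iff]
  rw [PySem.Chars.endswith_iff]
  have hcomp : ((fun c => c != ' ') ∘ PySem.Chars.upperChar) = (fun c => c != ' ') := by
    funext c; exact pv_upperChar_space c
  have hup : PySem.Chars.upper (' ' :: w) = ' ' :: PySem.Chars.upper w := by
    simp [PySem.Chars.upper, show PySem.Chars.upperChar ' ' = ' ' from rfl]
  rw [hup]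
  rw [← List.reverse_prefix]
  have e1 : (' ' :: PySem.Chars.upper w).reverse = (PySem.Chars.upper w).reverse ++ [' '] := by simp
  have e2 : (PySem.Chars.upper base).reverse = PySem.Chars.upper base.reverse := by
    simp [PySem.Chars.upper, List.map_reverse]
  rw [e1, e2]
  rw [pv_prefix_token _ _ (by
    intro c hc
    rw [List.mem_reverse] at hc
    simp only [PySem.Chars.upper, List.mem_map] at hc
    obtain ⟨c', hc', rfl⟩ := hc
    rw [pv_upperChar_space]; exact hw c' hc')]
  have e3 : (PySem.Chars.upper base.reverse).takeWhile (fun c => c != ' ') =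
      PySem.Chars.upper (base.reverse.takeWhile (fun c => c != ' ')) := by
    unfold PySem.Chars.upper
    rw [List.takeWhile_map, hcomp]
  rw [e3]
  have e4 : (PySem.Chars.upper (base.reverse.takeWhile (fun c => c != ' '))).length =
      (base.reverse.takeWhile (fun c => c != ' ')).length := by simp [PySem.Chars.upper]
  have e5 : (PySem.Chars.upper base.reverse).length = base.reverse.length := by simp [PySem.Chars.upper]
  rw [e4, e5]
  simp only [Bool.and_eq_true, decide_eq_true_eq]
  tauto

-- Python slice base[:-n]
lemma pv_slice_take (xs : List Char) (n : Nat) (hn : 0 < n) (h : n ≤ xs.length) :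
    PySem.List.slice xs none (some (-(n : Int))) = xs.take (xs.length - n) := by
  have e : PySem.List.clampIdx xs.length (-(n : Int)) = xs.length - n := by
    unfold PySem.List.clampIdx
    rw [if_pos (show -((n : Nat) : Int) < 0 by omega),
        if_neg (show ¬((xs.length : Int) + -((n : Nat) : Int) < 0) by omega)]
    omega
  simp [PySem.List.slice, e]

-- the common value both programs return when a suffix matches
def pvV (base : List Char) : List Char :=
  pvRstripChars ((base.reverse.drop ((base.reverse.takeWhile (fun c => c != ' ')).length + 1)).reverse) [' ', ',']

-- A's loop returns pvV iff some suffix matches, independent of which one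
lemma pv_loop (base : List Char) (L : List (List Char))
    (hL : ∀ s ∈ L, ∃ w, s = ' ' :: w ∧ ∀ c ∈ w, (c != ' ') = true) :
    pvStripLoopA base L =
      if L.any (fun s => PySem.Chars.endswith (PySem.Chars.upper base) (PySem.Chars.upper s)) then pvV base
      else base := by
  induction L with
  | nil => simp [pvStripLoopA]
  | cons s rest ih =>
    obtain ⟨w, rfl, hw⟩ := hL s (by simp)
    rw [pvStripLoopA]
    by_cases h : PySem.Chars.endswith (PySem.Chars.upper base) (PySem.Chars.upper (' ' :: w)) = true
    · rw [if_pos h, List.any_cons, h, Bool.true_or, if_pos rfl]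
      rw [pv_endswith_iff base w hw] at h
      simp only [Bool.and_eq_true, decide_eq_true_eq] at h
      obtain ⟨htok, hu⟩ := h
      have hlen : (base.reverse.takeWhile (fun c => c != ' ')).length = w.length := by
        have := congrArg List.length hu
        simpa [PySem.Chars.upper] using this
      have hle : (base.reverse.takeWhile (fun c => c != ' ')).length + 1 ≤ base.length := by
        have h1 : (base.reverse.takeWhile (fun c => c != ' ')).length ≤ base.reverse.length :=
          (List.takeWhile_sublist _).length_le
        have h2 : base.reverse.length = base.length := List.length_reverse
        omega
      have hs : (' ' :: w).length = w.length + 1 := rfl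
      rw [hs]
      have : (-(((w.length + 1 : Nat) : Int))) = (-((w.length + 1 : Nat) : Int)) := rfl
      rw [pv_slice_take base (w.length + 1) (by omega) (by omega)]
      unfold pvV
      rw [List.reverse_drop]
      rw [hlen]
      simp
    · rw [if_neg h, ih (fun s hs => hL s (by simp [hs]))]
      rw [List.any_cons]
      simp only [Bool.not_eq_true] at h
      rw [h, Bool.false_or]

lemma pv_rev_eq (u v : List Char) : (decide (u = v.reverse)) = (u.reverse == v) := by
  rw [Bool.eq_iff_iff, decide_eq_true_iff, beq_iff_eq]
  exact List.reverse_eq_iff.symm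

-- the main list-level equivalence
set_option maxRecDepth 16384 in
lemma pv_main (base : List Char) :
    pvStripLoopA base pvSuffixes =
      (let p := pvRpartitionSpace base
       if p.2.1 != [] && pvSuffixWords.contains (PySem.Chars.upper p.2.2) then
         pvRstripChars p.1 [' ', ','] else base) := by
  rw [pv_loop base pvSuffixes (by
    intro s hs
    fin_cases hs
    exacts [⟨"Corp".toList, rfl, fun c hc => List.all_eq_true.mp (show "Corp".toList.all (fun c => c != ' ') = true by decide) c hc⟩,
      ⟨"Group".toList, rfl, fun c hc => List.all_eq_true.mp (show "Group".toList.all (fun c => c != ' ') = true by decide) c hc⟩,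
      ⟨"Holdings".toList, rfl, fun c hc => List.all_eq_true.mp (show "Holdings".toList.all (fun c => c != ' ') = true by decide) c hc⟩,
      ⟨"International".toList, rfl, fun c hc => List.all_eq_true.mp (show "International".toList.all (fun c => c != ' ') = true by decide) c hc⟩,
      ⟨"Inc".toList, rfl, fun c hc => List.all_eq_true.mp (show "Inc".toList.all (fun c => c != ' ') = true by decide) c hc⟩,
      ⟨"Limited".toList, rfl, fun c hc => List.all_eq_true.mp (show "Limited".toList.all (fun c => c != ' ') = true by decide) c hc⟩,
      ⟨"Ltd".toList, rfl, fun c hc => List.all_eq_true.mp (show "Ltd".toList.all (fun c => c != ' ') = true by decide) c hc⟩,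
      ⟨"SA".toList, rfl, fun c hc => List.all_eq_true.mp (show "SA".toList.all (fun c => c != ' ') = true by decide) c hc⟩,
      ⟨"AG".toList, rfl, fun c hc => List.all_eq_true.mp (show "AG".toList.all (fun c => c != ' ') = true by decide) c hc⟩,
      ⟨"PLC".toList, rfl, fun c hc => List.all_eq_true.mp (show "PLC".toList.all (fun c => c != ' ') = true by decide) c hc⟩,
      ⟨"LLC".toList, rfl, fun c hc => List.all_eq_true.mp (show "LLC".toList.all (fun c => c != ' ') = true by decide) c hc⟩,
      ⟨"LP".toList, rfl, fun c hc => List.all_eq_true.mp (show "LP".toList.all (fun c => c != ' ') = true by decide) c hc⟩,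
      ⟨"Co".toList, rfl, fun c hc => List.all_eq_true.mp (show "Co".toList.all (fun c => c != ' ') = true by decide) c hc⟩,
      ⟨"NV".toList, rfl, fun c hc => List.all_eq_true.mp (show "NV".toList.all (fun c => c != ' ') = true by decide) c hc⟩,
      ⟨"BV".toList, rfl, fun c hc => List.all_eq_true.mp (show "BV".toList.all (fun c => c != ' ') = true by decide) c hc⟩,
      ⟨"SE".toList, rfl, fun c hc => List.all_eq_true.mp (show "SE".toList.all (fun c => c != ' ') = true by decide) c hc⟩,
      ⟨"SPA".toList, rfl, fun c hc => List.all_eq_true.mp (show "SPA".toList.all (fun c => c != ' ') = true by decide) c hc⟩,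
      ⟨"AB".toList, rfl, fun c hc => List.all_eq_true.mp (show "AB".toList.all (fun c => c != ' ') = true by decide) c hc⟩])]
  simp only [pvSuffixes, List.any_cons, List.any_nil, Bool.or_false]
  rw [show (" Corp".toList : List Char) = ' ' :: "Corp".toList from rfl,
      show (" Group".toList : List Char) = ' ' :: "Group".toList from rfl,
      show (" Holdings".toList : List Char) = ' ' :: "Holdings".toList from rfl,
      show (" International".toList : List Char) = ' ' :: "International".toList from rfl,
      show (" Inc".toList : List Char) = ' ' :: "Inc".toList from rfl,
      show (" Limited".toList : List Char) = ' ' :: "Limited".toList from rfl,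
      show (" Ltd".toList : List Char) = ' ' :: "Ltd".toList from rfl,
      show (" SA".toList : List Char) = ' ' :: "SA".toList from rfl,
      show (" AG".toList : List Char) = ' ' :: "AG".toList from rfl,
      show (" PLC".toList : List Char) = ' ' :: "PLC".toList from rfl,
      show (" LLC".toList : List Char) = ' ' :: "LLC".toList from rfl,
      show (" LP".toList : List Char) = ' ' :: "LP".toList from rfl,
      show (" Co".toList : List Char) = ' ' :: "Co".toList from rfl,
      show (" NV".toList : List Char) = ' ' :: "NV".toList from rfl,
      show (" BV".toList : List Char) = ' ' :: "BV".toList from rfl,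
      show (" SE".toList : List Char) = ' ' :: "SE".toList from rfl,
      show (" SPA".toList : List Char) = ' ' :: "SPA".toList from rfl,
      show (" AB".toList : List Char) = ' ' :: "AB".toList from rfl]
  rw [pv_endswith_iff base "Corp".toList (fun c hc => List.all_eq_true.mp (show "Corp".toList.all (fun c => c != ' ') = true by decide) c hc),
      pv_endswith_iff base "Group".toList (fun c hc => List.all_eq_true.mp (show "Group".toList.all (fun c => c != ' ') = true by decide) c hc),
      pv_endswith_iff base "Holdings".toList (fun c hc => List.all_eq_true.mp (show "Holdings".toList.all (fun c => c != ' ') = true by decide) c hc),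
      pv_endswith_iff base "International".toList (fun c hc => List.all_eq_true.mp (show "International".toList.all (fun c => c != ' ') = true by decide) c hc),
      pv_endswith_iff base "Inc".toList (fun c hc => List.all_eq_true.mp (show "Inc".toList.all (fun c => c != ' ') = true by decide) c hc),
      pv_endswith_iff base "Limited".toList (fun c hc => List.all_eq_true.mp (show "Limited".toList.all (fun c => c != ' ') = true by decide) c hc),
      pv_endswith_iff base "Ltd".toList (fun c hc => List.all_eq_true.mp (show "Ltd".toList.all (fun c => c != ' ') = true by decide) c hc),
      pv_endswith_iff base "SA".toList (fun c hc => List.all_eq_true.mp (show "SA".toList.all (fun c => c != ' ') = true by decide) c hc),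
      pv_endswith_iff base "AG".toList (fun c hc => List.all_eq_true.mp (show "AG".toList.all (fun c => c != ' ') = true by decide) c hc),
      pv_endswith_iff base "PLC".toList (fun c hc => List.all_eq_true.mp (show "PLC".toList.all (fun c => c != ' ') = true by decide) c hc),
      pv_endswith_iff base "LLC".toList (fun c hc => List.all_eq_true.mp (show "LLC".toList.all (fun c => c != ' ') = true by decide) c hc),
      pv_endswith_iff base "LP".toList (fun c hc => List.all_eq_true.mp (show "LP".toList.all (fun c => c != ' ') = true by decide) c hc),
      pv_endswith_iff base "Co".toList (fun c hc => List.all_eq_true.mp (show "Co".toList.all (fun c => c != ' ') = true by decide) c hc),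
      pv_endswith_iff base "NV".toList (fun c hc => List.all_eq_true.mp (show "NV".toList.all (fun c => c != ' ') = true by decide) c hc),
      pv_endswith_iff base "BV".toList (fun c hc => List.all_eq_true.mp (show "BV".toList.all (fun c => c != ' ') = true by decide) c hc),
      pv_endswith_iff base "SE".toList (fun c hc => List.all_eq_true.mp (show "SE".toList.all (fun c => c != ' ') = true by decide) c hc),
      pv_endswith_iff base "SPA".toList (fun c hc => List.all_eq_true.mp (show "SPA".toList.all (fun c => c != ' ') = true by decide) c hc),
      pv_endswith_iff base "AB".toList (fun c hc => List.all_eq_true.mp (show "AB".toList.all (fun c => c != ' ') = true by decide) c hc)]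
  by_cases hd : (base.reverse.takeWhile (fun c => c != ' ')).length = base.reverse.length
  · simp only [pvRpartitionSpace, if_pos hd]
    simp [hd]
  · simp only [pvRpartitionSpace, if_neg hd]
    have hd' : (decide ((base.reverse.takeWhile (fun c => c != ' ')).length ≠ base.reverse.length)) = true :=
      decide_eq_true hd
    rw [hd']
    simp only [Bool.true_and]
    have hrev : PySem.Chars.upper ((base.reverse.takeWhile (fun c => c != ' ')).reverse) =
        (PySem.Chars.upper (base.reverse.takeWhile (fun c => c != ' '))).reverse := by
      simp [PySem.Chars.upper, List.map_reverse]
    rw [show PySem.Chars.upper "Corp".toList = "CORP".toList from by decide,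
        show PySem.Chars.upper "Group".toList = "GROUP".toList from by decide,
        show PySem.Chars.upper "Holdings".toList = "HOLDINGS".toList from by decide,
        show PySem.Chars.upper "International".toList = "INTERNATIONAL".toList from by decide,
        show PySem.Chars.upper "Inc".toList = "INC".toList from by decide,
        show PySem.Chars.upper "Limited".toList = "LIMITED".toList from by decide,
        show PySem.Chars.upper "Ltd".toList = "LTD".toList from by decide,
        show PySem.Chars.upper "SA".toList = "SA".toList from by decide,
        show PySem.Chars.upper "AG".toList = "AG".toList from by decide,
        show PySem.Chars.upper "PLC".toList = "PLC".toList from by decide,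
        show PySem.Chars.upper "LLC".toList = "LLC".toList from by decide,
        show PySem.Chars.upper "LP".toList = "LP".toList from by decide,
        show PySem.Chars.upper "Co".toList = "CO".toList from by decide,
        show PySem.Chars.upper "NV".toList = "NV".toList from by decide,
        show PySem.Chars.upper "BV".toList = "BV".toList from by decide,
        show PySem.Chars.upper "SE".toList = "SE".toList from by decide,
        show PySem.Chars.upper "SPA".toList = "SPA".toList from by decide,
        show PySem.Chars.upper "AB".toList = "AB".toList from by decide]
    rw [pv_rev_eq, pv_rev_eq, pv_rev_eq, pv_rev_eq, pv_rev_eq, pv_rev_eq, pv_rev_eq,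
        pv_rev_eq, pv_rev_eq, pv_rev_eq, pv_rev_eq, pv_rev_eq, pv_rev_eq, pv_rev_eq,
        pv_rev_eq, pv_rev_eq, pv_rev_eq, pv_rev_eq]
    rw [hrev]
    simp only [pvSuffixWords, List.contains_cons]
    simp [pvV, List.contains_eq_mem]

-- ===== VERDICT (by name: the statement is the Claim_ definition above) =====
theorem strip_corporate_suffix_py_spec : Claim_equal_strip_corporate_suffix_py := by
  intro name _
  unfold Spec_strip_corporate_suffix_py strip_corporate_suffix_py strip_corporate_suffix_py_alt
  rw [pv_main]
  exact apply_ite String.ofList _ _ _
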